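-- pv_equiv track=rewrite | github.com/Fiore0312/context-engineer-agent | src/analyzers/framework_detector.py | _categorize_frameworks
-- ===== SOURCE A (Python) =====
-- from typing import Dict, List, Any, Optional, Set
--
-- def _categorize_frameworks(frameworks: List[str]) -> Dict[str, List[str]]:
--     """Categorizza framework rilevati"""
--     categories = {
--         'frontend': [],
--         'backend': [],
--         'mobile': [],
--         'desktop': [],
--         'css': [],
--         'build_tools': [],
--         'testing': [],
--         'database': []
--     }
--
--     framework_categories = {
--         'react': 'frontend',
--         'vue': 'frontend',
--         'angular': 'frontend',
--         'svelte': 'frontend',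
--         'next': 'frontend',
--         'nuxt': 'frontend',
--         'express': 'backend',
--         'fastify': 'backend',
--         'koa': 'backend',
--         'nestjs': 'backend',
--         'laravel': 'backend',
--         'symfony': 'backend',
--         'codeigniter': 'backend',
--         'django': 'backend',
--         'flask': 'backend',
--         'fastapi': 'backend',
--         'tornado': 'backend',
--         'react-native': 'mobile',
--         'flutter': 'mobile',
--         'electron': 'desktop',
--         'tauri': 'desktop',
--         'tailwind': 'css',
--         'bootstrap': 'css',
--         'webpack': 'build_tools',
--         'vite': 'build_tools',
--         'rollup': 'build_tools'
--     }
--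
--     for framework in frameworks:
--         category = framework_categories.get(framework, 'other')
--         if category in categories:
--             categories[category].append(framework)
--         else:
--             categories.setdefault('other', []).append(framework)
--
--     # Rimuovi categorie vuote
--     return {k: v for k, v in categories.items() if v}
-- ===== SOURCE B (Python) =====
-- CATEGORY_ORDER = ['frontend', 'backend', 'mobile', 'desktop', 'css',
--                   'build_tools', 'testing', 'database']
--
-- FRAMEWORK_CATEGORIES = {
--     'react': 'frontend', 'vue': 'frontend', 'angular': 'frontend',
--     'svelte': 'frontend', 'next': 'frontend', 'nuxt': 'frontend',
--     'express': 'backend', 'fastify': 'backend', 'koa': 'backend',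
--     'nestjs': 'backend', 'laravel': 'backend', 'symfony': 'backend',
--     'codeigniter': 'backend', 'django': 'backend', 'flask': 'backend',
--     'fastapi': 'backend', 'tornado': 'backend',
--     'react-native': 'mobile', 'flutter': 'mobile',
--     'electron': 'desktop', 'tauri': 'desktop',
--     'tailwind': 'css', 'bootstrap': 'css',
--     'webpack': 'build_tools', 'vite': 'build_tools', 'rollup': 'build_tools'
-- }
--
--
-- def _categorize_frameworks(frameworks):
--     """Categorizza framework rilevati: one bucket per category, scanned per category."""
--     result = {}
--     for cat in CATEGORY_ORDER:
--         members = [f for f in frameworks if FRAMEWORK_CATEGORIES.get(f) == cat]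
--         if members:
--             result[cat] = members
--     others = [f for f in frameworks if f not in FRAMEWORK_CATEGORIES]
--     if others:
--         result['other'] = others
--     return result
-- ===== Notes on version B (the rewrite author's own statement) =====
-- stated objective: alternative
-- what changed: Replaces A's single dispatching pass that mutates a pre-seeded dict of buckets with an outer loop over the fixed category order, each category's bucket built by its own scan of the input (plus one final scan for 'other'), appending only non-empty buckets.
import Mathlib
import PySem

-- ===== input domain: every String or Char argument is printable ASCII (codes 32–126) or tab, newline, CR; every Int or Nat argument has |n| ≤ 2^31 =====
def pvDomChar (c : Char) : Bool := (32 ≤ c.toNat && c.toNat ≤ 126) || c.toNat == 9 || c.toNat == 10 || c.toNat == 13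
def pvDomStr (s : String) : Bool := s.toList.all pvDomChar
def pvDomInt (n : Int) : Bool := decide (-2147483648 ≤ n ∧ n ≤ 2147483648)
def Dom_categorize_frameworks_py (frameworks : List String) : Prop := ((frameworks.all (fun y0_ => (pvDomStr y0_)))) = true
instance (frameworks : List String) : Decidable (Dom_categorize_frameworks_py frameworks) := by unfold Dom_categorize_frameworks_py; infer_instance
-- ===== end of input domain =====

-- B replaces A's single dispatching pass mutating a pre-seeded dict of buckets with an
-- outer loop over the fixed category order, each bucket built by its own scan of the
-- input (plus one final scan for 'other'); same return value (objective: alternative).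

-- ===== PORT A =====
-- framework_categories literal of A
def pvFcA : PySem.Dict String String := PySem.Dict.ofList
  [("react", "frontend"), ("vue", "frontend"), ("angular", "frontend"),
   ("svelte", "frontend"), ("next", "frontend"), ("nuxt", "frontend"),
   ("express", "backend"), ("fastify", "backend"), ("koa", "backend"),
   ("nestjs", "backend"), ("laravel", "backend"), ("symfony", "backend"),
   ("codeigniter", "backend"), ("django", "backend"), ("flask", "backend"),
   ("fastapi", "backend"), ("tornado", "backend"),
   ("react-native", "mobile"), ("flutter", "mobile"),
   ("electron", "desktop"), ("tauri", "desktop"),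
   ("tailwind", "css"), ("bootstrap", "css"),
   ("webpack", "build_tools"), ("vite", "build_tools"), ("rollup", "build_tools")]

-- the initial 'categories' dict of A (8 empty buckets)
def pvCatsInit : PySem.Dict String (List String) := PySem.Dict.ofList
  [("frontend", []), ("backend", []), ("mobile", []), ("desktop", []),
   ("css", []), ("build_tools", []), ("testing", []), ("database", [])]

-- one iteration of A's 'for framework in frameworks' loop
def pvStepA (d : PySem.Dict String (List String)) (framework : String) :
    PySem.Dict String (List String) :=
  let category := pvFcA.getD framework "other"
  if d.contains category then
    d.modify category [] (· ++ [framework])          -- categories[category].append(framework)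
  else
    (d.setdefault "other" []).modify "other" [] (· ++ [framework])
      -- categories.setdefault('other', []).append(framework): the returned (aliased) list
      -- is appended to in place, i.e. the dict's 'other' entry grows by framework

def categorize_frameworks_py (frameworks : List String) : List (String × List String) :=
  (frameworks.foldl pvStepA pvCatsInit).items.filter (fun p => !p.2.isEmpty)
  -- {k: v for k, v in categories.items() if v}

-- ===== PORT B =====
def pvCategoryOrder : List String :=
  ["frontend", "backend", "mobile", "desktop", "css", "build_tools", "testing", "database"]

def pvFcB : PySem.Dict String String := PySem.Dict.ofList
  [("react", "frontend"), ("vue", "frontend"), ("angular", "frontend"),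
   ("svelte", "frontend"), ("next", "frontend"), ("nuxt", "frontend"),
   ("express", "backend"), ("fastify", "backend"), ("koa", "backend"),
   ("nestjs", "backend"), ("laravel", "backend"), ("symfony", "backend"),
   ("codeigniter", "backend"), ("django", "backend"), ("flask", "backend"),
   ("fastapi", "backend"), ("tornado", "backend"),
   ("react-native", "mobile"), ("flutter", "mobile"),
   ("electron", "desktop"), ("tauri", "desktop"),
   ("tailwind", "css"), ("bootstrap", "css"),
   ("webpack", "build_tools"), ("vite", "build_tools"), ("rollup", "build_tools")]

def categorize_frameworks_py_alt (frameworks : List String) : List (String × List String) :=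
  let result := pvCategoryOrder.foldl (fun acc cat =>
    let members := frameworks.filter (fun f => pvFcB.get? f == some cat)
    if members.isEmpty then acc else acc ++ [(cat, members)]) []
  let others := frameworks.filter (fun f => !pvFcB.contains f)
  if others.isEmpty then result else result ++ [("other", others)]

-- ===== PRECONDITION & SPEC =====
def Spec_categorize_frameworks_py (frameworks : List String) (out : List (String × List String)) : Prop := out = categorize_frameworks_py_alt frameworks
instance (frameworks : List String) (out : List (String × List String)) : Decidable (Spec_categorize_frameworks_py frameworks out) := by unfold Spec_categorize_frameworks_py; infer_instance

-- ===== CLAIM (what is proved, stated in full; the proofs are below) =====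
def Claim_equal_categorize_frameworks_py : Prop := ∀ (frameworks : List String), Dom_categorize_frameworks_py frameworks → Spec_categorize_frameworks_py frameworks (categorize_frameworks_py frameworks)

-- ===== LEMMAS AND PROOFS =====

-- A's category of a framework
def pvCat (f : String) : String := pvFcA.getD f "other"

-- the bucket a prefix l of the input has accumulated for category c
def pvBucket (c : String) (l : List String) : List String :=
  l.filter (fun f => pvCat f == c)

-- the items list A's dict holds after processing l
def pvE (l : List String) : List (String × List String) :=
  pvCategoryOrder.map (fun c => (c, pvBucket c l))
  ++ (if (pvBucket "other" l).isEmpty then [] else [("other", pvBucket "other" l)])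

lemma pvFcB_eq : pvFcB = pvFcA := rfl

lemma pvOther_not_mem : "other" ∉ pvCategoryOrder := by decide

lemma pvCat_mem_or_other (f : String) : pvCat f ∈ pvCategoryOrder ∨ pvCat f = "other" := by
  unfold pvCat
  rw [PySem.Dict.getD_eq_get?_getD]
  cases hv : pvFcA.get? f with
  | none => right; rfl
  | some v =>
      left
      have hm := PySem.Dict.mem_items_of_get?_eq_some _ hv
      have : pvFcA.items =
        [("react", "frontend"), ("vue", "frontend"), ("angular", "frontend"),
         ("svelte", "frontend"), ("next", "frontend"), ("nuxt", "frontend"),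
         ("express", "backend"), ("fastify", "backend"), ("koa", "backend"),
         ("nestjs", "backend"), ("laravel", "backend"), ("symfony", "backend"),
         ("codeigniter", "backend"), ("django", "backend"), ("flask", "backend"),
         ("fastapi", "backend"), ("tornado", "backend"),
         ("react-native", "mobile"), ("flutter", "mobile"),
         ("electron", "desktop"), ("tauri", "desktop"),
         ("tailwind", "css"), ("bootstrap", "css"),
         ("webpack", "build_tools"), ("vite", "build_tools"), ("rollup", "build_tools")] := rfl
      rw [this] at hm
      simp only [List.mem_cons, List.not_mem_nil, or_false, Prod.mk.injEq] at hm
      rcases hm with ⟨_, h⟩|⟨_, h⟩|⟨_, h⟩|⟨_, h⟩|⟨_, h⟩|⟨_, h⟩|⟨_, h⟩|⟨_, h⟩|⟨_, h⟩|⟨_, h⟩|⟨_, h⟩|⟨_, h⟩|⟨_, h⟩|⟨_, h⟩|⟨_, h⟩|⟨_, h⟩|⟨_, h⟩|⟨_, h⟩|⟨_, h⟩|⟨_, h⟩|⟨_, h⟩|⟨_, h⟩|⟨_, h⟩|⟨_, h⟩|⟨_, h⟩|⟨_, h⟩ <;>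
        (subst h; decide)

lemma pvNoOtherValue (f : String) : pvFcA.get? f ≠ some "other" := by
  intro hv
  have hm := PySem.Dict.mem_items_of_get?_eq_some _ hv
  have hit : pvFcA.items =
    [("react", "frontend"), ("vue", "frontend"), ("angular", "frontend"),
     ("svelte", "frontend"), ("next", "frontend"), ("nuxt", "frontend"),
     ("express", "backend"), ("fastify", "backend"), ("koa", "backend"),
     ("nestjs", "backend"), ("laravel", "backend"), ("symfony", "backend"),
     ("codeigniter", "backend"), ("django", "backend"), ("flask", "backend"),
     ("fastapi", "backend"), ("tornado", "backend"),
     ("react-native", "mobile"), ("flutter", "mobile"),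
     ("electron", "desktop"), ("tauri", "desktop"),
     ("tailwind", "css"), ("bootstrap", "css"),
     ("webpack", "build_tools"), ("vite", "build_tools"), ("rollup", "build_tools")] := rfl
  rw [hit] at hm
  simp at hm

-- bucket after one more framework
lemma pvBucket_append (c : String) (l : List String) (f : String) :
    pvBucket c (l ++ [f]) = pvBucket c l ++ (if pvCat f == c then [f] else []) := by
  cases hb : pvCat f == c <;> simp [pvBucket, List.filter_append, List.filter, hb]

-- one A-step on a dict whose items are pvE l yields the items pvE (l ++ [f])
lemma pvStep_eq (d : PySem.Dict String (List String)) (f : String) :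
    pvStepA d f =
      if d.contains (pvCat f) then d.modify (pvCat f) [] (· ++ [f])
      else (d.setdefault "other" []).modify "other" [] (· ++ [f]) := rfl

lemma pvStep_items (l : List String) (f : String) :
    (pvStepA ⟨pvE l⟩ f).items = pvE (l ++ [f]) := by
  rcases pvCat_mem_or_other f with hc | hc
  · simp only [pvCategoryOrder, List.mem_cons, List.not_mem_nil, or_false] at hc
    rcases hc with hc|hc|hc|hc|hc|hc|hc|hc <;>
    · rw [pvStep_eq, hc]
      by_cases ho : pvBucket "other" l = []
      · simp [pvE, pvCategoryOrder, pvBucket_append, ho, hc,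
          PySem.Dict.contains, PySem.Dict.modify, PySem.Dict.insert,
          PySem.Dict.getD, PySem.Dict.get?]
      · have ho' : (pvBucket "other" l).isEmpty = false := by simpa using ho
        simp [pvE, pvCategoryOrder, pvBucket_append, ho', hc,
          PySem.Dict.contains, PySem.Dict.modify, PySem.Dict.insert,
          PySem.Dict.getD, PySem.Dict.get?]
  · rw [pvStep_eq, hc]
    by_cases ho : pvBucket "other" l = []
    · simp [pvE, pvCategoryOrder, pvBucket_append, ho, hc,
        PySem.Dict.contains, PySem.Dict.modify, PySem.Dict.insert,
        PySem.Dict.setdefault, PySem.Dict.getD, PySem.Dict.get?]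
    · have ho' : (pvBucket "other" l).isEmpty = false := by simpa using ho
      simp [pvE, pvCategoryOrder, pvBucket_append, ho', hc,
        PySem.Dict.contains, PySem.Dict.modify, PySem.Dict.insert,
        PySem.Dict.getD, PySem.Dict.get?]

-- A's dict after processing l has exactly the items pvE l
lemma pvLoop_items (l : List String) : (l.foldl pvStepA pvCatsInit).items = pvE l := by
  induction l using List.reverseRecOn with
  | nil => rfl
  | append_singleton l f ih =>
      rw [List.foldl_append, List.foldl_cons, List.foldl_nil,
        PySem.Dict.ext (y := ⟨pvE l⟩) ih]
      exact pvStep_items l f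

-- final assembly of A from pvE
lemma pvA_eq (frameworks : List String) :
    categorize_frameworks_py frameworks =
      (pvCategoryOrder.filter (fun c => !(pvBucket c frameworks).isEmpty)).map
        (fun c => (c, pvBucket c frameworks))
      ++ (if (pvBucket "other" frameworks).isEmpty then []
          else [("other", pvBucket "other" frameworks)]) := by
  unfold categorize_frameworks_py
  rw [pvLoop_items]
  unfold pvE
  rw [List.filter_append, List.filter_map]
  by_cases h : (pvBucket "other" frameworks).isEmpty <;>
    simp [h, Function.comp_def]

-- B's result in the same closed form
lemma pvB_eq (frameworks : List String) :
    categorize_frameworks_py_alt frameworks =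
      (pvCategoryOrder.filter
          (fun c => !(frameworks.filter (fun f => pvFcB.get? f == some c)).isEmpty)).map
        (fun c => (c, frameworks.filter (fun f => pvFcB.get? f == some c)))
      ++ (if (frameworks.filter (fun f => !pvFcB.contains f)).isEmpty then []
          else [("other", frameworks.filter (fun f => !pvFcB.contains f))]) := by
  unfold categorize_frameworks_py_alt
  rw [PySem.List.foldl_congr_mem _ _
        (fun acc c => if !(frameworks.filter (fun f => pvFcB.get? f == some c)).isEmpty
          then acc ++ [(c, frameworks.filter (fun f => pvFcB.get? f == some c))] else acc)
        _ (by intro acc c _; cases hm : (frameworks.filter (fun f => pvFcB.get? f == some c)).isEmpty <;> simp [hm]),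
      PySem.List.foldl_append_if, List.nil_append]
  by_cases h : (frameworks.filter (fun f => !pvFcB.contains f)).isEmpty <;> simp [h]

-- the two membership predicates agree, category by category
lemma pvPred_eq {c : String} (hcm : c ∈ pvCategoryOrder) (f : String) :
    (pvFcB.get? f == some c) = (pvCat f == c) := by
  rw [pvFcB_eq]
  have hne : c ≠ "other" := by rintro rfl; exact pvOther_not_mem hcm
  cases hv : pvFcA.get? f with
  | none =>
      have h1 : pvCat f = "other" := by
        unfold pvCat; rw [PySem.Dict.getD_eq_get?_getD, hv]; rfl
      simp [h1, Ne.symm hne]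
  | some v =>
      have h1 : pvCat f = v := by
        unfold pvCat; rw [PySem.Dict.getD_eq_get?_getD, hv]; rfl
      simp [h1]

lemma pvOther_pred_eq (f : String) :
    (!pvFcB.contains f) = (pvCat f == "other") := by
  rw [pvFcB_eq, PySem.Dict.contains_eq_isSome_get?]
  cases hv : pvFcA.get? f with
  | none =>
      have h1 : pvCat f = "other" := by
        unfold pvCat; rw [PySem.Dict.getD_eq_get?_getD, hv]; rfl
      simp [h1]
  | some v =>
      have h1 : pvCat f = v := by
        unfold pvCat; rw [PySem.Dict.getD_eq_get?_getD, hv]; rfl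
      have h2 : v ≠ "other" := by
        rintro rfl; exact pvNoOtherValue f hv
      simp [h1, h2]

lemma pvMembers_eq {c : String} (hcm : c ∈ pvCategoryOrder) (frameworks : List String) :
    frameworks.filter (fun f => pvFcB.get? f == some c) = pvBucket c frameworks := by
  unfold pvBucket
  exact List.filter_congr (fun f _ => pvPred_eq hcm f)

lemma pvOthers_eq (frameworks : List String) :
    frameworks.filter (fun f => !pvFcB.contains f) = pvBucket "other" frameworks := by
  unfold pvBucket
  exact List.filter_congr (fun f _ => pvOther_pred_eq f)

-- ===== VERDICT (by name: the statement is the Claim_ definition above) =====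
theorem categorize_frameworks_py_spec : Claim_equal_categorize_frameworks_py := by
  intro frameworks _
  unfold Spec_categorize_frameworks_py
  rw [pvA_eq, pvB_eq, pvOthers_eq]
  have h1 : pvCategoryOrder.filter
      (fun c => !(frameworks.filter (fun f => pvFcB.get? f == some c)).isEmpty) =
      pvCategoryOrder.filter (fun c => !(pvBucket c frameworks).isEmpty) :=
    List.filter_congr (fun c hcm => by rw [pvMembers_eq hcm frameworks])
  rw [h1]
  have h2 : (pvCategoryOrder.filter (fun c => !(pvBucket c frameworks).isEmpty)).map
      (fun c => (c, frameworks.filter (fun f => pvFcB.get? f == some c))) =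
      (pvCategoryOrder.filter (fun c => !(pvBucket c frameworks).isEmpty)).map
      (fun c => (c, pvBucket c frameworks)) :=
    List.map_congr_left (fun c hcm =>
      by rw [pvMembers_eq (List.mem_of_mem_filter hcm) frameworks])
  rw [h2]
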